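-- pv_equiv track=rewrite | github.com/Etamus/Lou_LLM | LouFormatter.py | _split_after_question_marks
-- ===== SOURCE A (Python) =====
-- def _split_after_question_marks(text: str) -> list[str]:
--     snippet = (text or "").strip()
--     if not snippet:
--         return []
--     if "?" not in snippet:
--         return [_ensure_sentence_capitalization(snippet)]
--     segments: list[str] = []
--     buffer: list[str] = []
--     for char in snippet:
--         buffer.append(char)
--         if char == "?":
--             segment = "".join(buffer).strip()
--             if segment:
--                 segments.append(_ensure_sentence_capitalization(segment))
--             buffer = []
--     tail = "".join(buffer).strip()
--     if tail:
--         segments.append(_ensure_sentence_capitalization(tail))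
--     return segments
--
-- def _ensure_sentence_capitalization(text: str) -> str:
--     if not text:
--         return ""
--     stripped = text.lstrip()
--     leading_ws = text[: len(text) - len(stripped)]
--     if stripped and stripped[0].islower():
--         stripped = stripped[0].upper() + stripped[1:]
--     return f"{leading_ws}{stripped}".strip()
-- ===== SOURCE B (Python) =====
-- def _split_after_question_marks(text: str) -> list[str]:
--     snippet = (text or "").strip()
--     if not snippet:
--         return []
--     *head, last = snippet.split("?")
--     pieces = [part + "?" for part in head] + [last]
--     stripped = [piece.strip() for piece in pieces]
--     return [_ensure_sentence_capitalization(seg) for seg in stripped if seg]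
--
--
-- def _ensure_sentence_capitalization(text: str) -> str:
--     if not text:
--         return ""
--     stripped = text.lstrip()
--     leading_ws = text[: len(text) - len(stripped)]
--     if stripped and stripped[0].islower():
--         stripped = stripped[0].upper() + stripped[1:]
--     return f"{leading_ws}{stripped}".strip()
-- ===== Notes on version B (the rewrite author's own statement) =====
-- stated objective: simpler
-- what changed: Replaces A's char-by-char buffer loop (and its separate no-question-mark fast path) with one str.split on the question mark, reattaching the separator to every part but the last, followed by a strip/filter/capitalize comprehension.
import Mathlib
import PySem

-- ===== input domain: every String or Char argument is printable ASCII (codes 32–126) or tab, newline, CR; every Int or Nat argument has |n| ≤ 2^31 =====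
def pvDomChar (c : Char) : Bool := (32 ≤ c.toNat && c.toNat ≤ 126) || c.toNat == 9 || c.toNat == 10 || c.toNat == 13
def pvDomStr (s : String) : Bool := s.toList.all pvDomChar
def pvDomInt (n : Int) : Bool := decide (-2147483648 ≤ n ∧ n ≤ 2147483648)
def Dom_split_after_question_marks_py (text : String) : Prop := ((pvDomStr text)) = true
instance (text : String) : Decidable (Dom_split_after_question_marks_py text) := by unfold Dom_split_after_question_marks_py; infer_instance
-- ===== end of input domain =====

-- B replaces A's char-by-char buffer loop with str.split on the question mark plus reattaching the separator to all but the last part; objective: simpler, same cost.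

-- ===== PORT A =====
-- port of _ensure_sentence_capitalization (shared helper, identical in A's and B's Python)
def ensure_sentence_capitalization_py (cs : List Char) : List Char :=
  if cs = [] then []
  else
    let stripped := PySem.Chars.lstrip cs
    let leading_ws := PySem.List.slice cs none (some ((cs.length : Int) - (stripped.length : Int)))
    let stripped2 :=
      match stripped with
      | [] => ([] : List Char)
      | c :: rest => if PySem.Chars.islower c then PySem.Chars.upperChar c :: rest else c :: rest
    PySem.Chars.strip (leading_ws ++ stripped2)

def split_after_question_marks_py (text : String) : List String :=
  let snippet := PySem.Chars.strip text.toList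
  if snippet = [] then []
  else if PySem.Chars.isIn ['?'] snippet = false then
    [String.ofList (ensure_sentence_capitalization_py snippet)]
  else
    let st := snippet.foldl
      (fun (st : List String × List Char) char =>
        let buffer := st.2 ++ [char]
        if char = '?' then
          let segment := PySem.Chars.strip buffer
          ((if segment ≠ [] then st.1 ++ [String.ofList (ensure_sentence_capitalization_py segment)] else st.1), ([] : List Char))
        else (st.1, buffer))
      (([] : List String), ([] : List Char))
    let tail := PySem.Chars.strip st.2
    if tail ≠ [] then st.1 ++ [String.ofList (ensure_sentence_capitalization_py tail)] else st.1

-- ===== PORT B =====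
def split_after_question_marks_py_alt (text : String) : List String :=
  let snippet := PySem.Chars.strip text.toList
  if snippet = [] then []
  else
    let parts := snippet.splitOn '?'
    let pieces := parts.dropLast.map (· ++ ['?']) ++ [parts.getLastD []]
    List.filterMap
      (fun seg => if seg ≠ [] then some (String.ofList (ensure_sentence_capitalization_py seg)) else none)
      (List.map PySem.Chars.strip pieces)

-- ===== PRECONDITION & SPEC =====
def Spec_split_after_question_marks_py (text : String) (out : List String) : Prop := out = split_after_question_marks_py_alt text
instance (text : String) (out : List String) : Decidable (Spec_split_after_question_marks_py text out) := by unfold Spec_split_after_question_marks_py; infer_instance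

-- ===== CLAIM (what is proved, stated in full; the proofs are below) =====
def Claim_equal_split_after_question_marks_py : Prop := ∀ (text : String), Dom_split_after_question_marks_py text → Spec_split_after_question_marks_py text (split_after_question_marks_py text)

-- ===== LEMMAS AND PROOFS =====

-- one output segment from one reconstructed piece
def pvSeg (p : List Char) : List String :=
  if PySem.Chars.strip p ≠ [] then [String.ofList (ensure_sentence_capitalization_py (PySem.Chars.strip p))] else []

-- B's result as a structural recursion over the split parts
def pvRender : List (List Char) → List String
  | [] => []
  | [p] => pvSeg p
  | p :: q :: ps => pvSeg (p ++ ['?']) ++ pvRender (q :: ps)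

-- A's loop body and finishing step, named for the proofs (definitionally the port's inline code)
def pvStepA (st : List String × List Char) (char : Char) : List String × List Char :=
  let buffer := st.2 ++ [char]
  if char = '?' then
    let segment := PySem.Chars.strip buffer
    ((if segment ≠ [] then st.1 ++ [String.ofList (ensure_sentence_capitalization_py segment)] else st.1), ([] : List Char))
  else (st.1, buffer)

def pvFinish (st : List String × List Char) : List String :=
  let tail := PySem.Chars.strip st.2
  if tail ≠ [] then st.1 ++ [String.ofList (ensure_sentence_capitalization_py tail)] else st.1

lemma pvDropWhile_dropWhile (p : Char → Bool) (l : List Char) :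
    (l.dropWhile p).dropWhile p = l.dropWhile p := by
  induction l with
  | nil => simp
  | cons a l ih =>
    by_cases h : p a = true
    · simpa [List.dropWhile_cons, h] using ih
    · simp [h]

lemma pvDropWhile_head_false (p : Char → Bool) (l : List Char) (c : List Char) (x : Char)
    (h : l.dropWhile p = x :: c) : p x = false := by
  induction l with
  | nil => simp at h
  | cons a l ih =>
    by_cases ha : p a = true
    · exact ih (by simpa [List.dropWhile_cons, ha] using h)
    · rw [List.dropWhile_cons, if_neg ha] at h
      cases h
      simpa using ha

lemma pvRstrip_idem (l : List Char) : PySem.Chars.rstrip (PySem.Chars.rstrip l) = PySem.Chars.rstrip l := by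
  unfold PySem.Chars.rstrip
  rw [List.reverse_reverse, pvDropWhile_dropWhile]

lemma pvLstrip_rstrip_lstrip (l : List Char) :
    PySem.Chars.lstrip (PySem.Chars.rstrip (PySem.Chars.lstrip l)) = PySem.Chars.rstrip (PySem.Chars.lstrip l) := by
  set t := PySem.Chars.lstrip l with ht
  rcases h : PySem.Chars.rstrip t with _ | ⟨x, r⟩
  · simp [PySem.Chars.lstrip]
  · -- rstrip t is a prefix of t, so x is t's head, which is not a space
    have hpre : PySem.Chars.rstrip t <+: t := by
      have := List.dropWhile_suffix (l := t.reverse) (p := PySem.Chars.isspace)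
      simpa [PySem.Chars.rstrip] using (List.reverse_prefix.mpr this)
    rw [h] at hpre
    obtain ⟨rest, hrest⟩ := hpre
    have hx : PySem.Chars.isspace x = false := by
      apply pvDropWhile_head_false PySem.Chars.isspace l (r ++ rest)
      simpa [PySem.Chars.lstrip, ← hrest] using ht.symm
    simp [PySem.Chars.lstrip, hx]

lemma pvStrip_idem (l : List Char) : PySem.Chars.strip (PySem.Chars.strip l) = PySem.Chars.strip l := by
  simp [PySem.Chars.strip, pvLstrip_rstrip_lstrip, pvRstrip_idem]

lemma pvSplitOnP_prefix (buf cs : List Char) (h : '?' ∉ buf) :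
    List.splitOnP (· == '?') (buf ++ '?' :: cs) = buf :: List.splitOnP (· == '?') cs := by
  induction buf with
  | nil => simp [List.splitOnP_cons]
  | cons a buf ih =>
    have ha : (a == '?') = false := by
      simp only [beq_eq_false_iff_ne]; intro hx; exact h (hx ▸ List.mem_cons_self)
    have h' : '?' ∉ buf := fun hm => h (List.mem_cons_of_mem _ hm)
    simp [List.splitOnP_cons, ha, ih h']

lemma pvRender_ne_nil_cons (p q : List Char) (ps : List (List Char)) :
    pvRender (p :: q :: ps) = pvSeg (p ++ ['?']) ++ pvRender (q :: ps) := rfl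

-- B's piece pipeline equals the structural recursion
lemma pvB_eq_render (parts : List (List Char)) (hne : parts ≠ []) :
    List.filterMap
      (fun seg => if seg ≠ [] then some (String.ofList (ensure_sentence_capitalization_py seg)) else none)
      (List.map PySem.Chars.strip (parts.dropLast.map (· ++ ['?']) ++ [parts.getLastD []]))
      = pvRender parts := by
  induction parts with
  | nil => exact absurd rfl hne
  | cons p ps ih =>
    cases ps with
    | nil =>
      show List.filterMap _ [PySem.Chars.strip p] = pvSeg p
      unfold pvSeg
      split_ifs <;> simp_all
    | cons q qs =>
      have ih' := ih (List.cons_ne_nil q qs)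
      have hexp : ((p :: q :: qs).dropLast.map (· ++ ['?']) ++ [(p :: q :: qs).getLastD []])
          = (p ++ ['?']) :: ((q :: qs).dropLast.map (· ++ ['?']) ++ [(q :: qs).getLastD []]) := by
        simp [List.dropLast_cons₂]
      rw [hexp, List.map_cons, List.filterMap_cons, pvRender_ne_nil_cons, ih']
      unfold pvSeg
      by_cases hs : PySem.Chars.strip (p ++ ['?']) = [] <;> simp [hs]

-- the loop invariant: finishing A's fold from state (segs, buf) renders the split of buf ++ l
lemma pvLoop (l : List Char) : ∀ (buf : List Char) (segs : List String), '?' ∉ buf →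
    pvFinish (List.foldl pvStepA (segs, buf) l)
      = segs ++ pvRender (List.splitOnP (· == '?') (buf ++ l)) := by
  induction l with
  | nil =>
    intro buf segs h
    have hsingle : List.splitOnP (· == '?') buf = [buf] :=
      List.splitOnP_eq_single _ _ (fun x hx => by
        simp only [beq_iff_eq]; intro hq; exact h (hq ▸ hx))
    rw [List.foldl_nil, List.append_nil, hsingle]
    show pvFinish (segs, buf) = segs ++ pvSeg buf
    unfold pvFinish pvSeg
    split_ifs <;> simp_all
  | cons c cs ih =>
    intro buf segs h
    rw [List.foldl_cons]
    by_cases hc : c = '?'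
    · subst hc
      have hstep : pvStepA (segs, buf) '?' =
          ((if PySem.Chars.strip (buf ++ ['?']) ≠ [] then segs ++ [String.ofList (ensure_sentence_capitalization_py (PySem.Chars.strip (buf ++ ['?'])))] else segs), ([] : List Char)) := by
        simp [pvStepA]
      rw [hstep, ih [] _ (by simp), List.nil_append, pvSplitOnP_prefix buf cs h]
      obtain ⟨q, qs, hq⟩ : ∃ q qs, List.splitOnP (· == '?') cs = q :: qs := by
        rcases hsp : List.splitOnP (· == '?') cs with _ | ⟨q, qs⟩
        · exact absurd hsp (List.splitOnP_ne_nil _ _)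
        · exact ⟨q, qs, rfl⟩
      rw [hq, pvRender_ne_nil_cons, ← hq]
      unfold pvSeg
      split_ifs <;> simp
    · have hbc : '?' ∉ buf ++ [c] := by
        intro hm
        rcases List.mem_append.mp hm with hm | hm
        · exact h hm
        · have hcq : '?' = c := by simpa using hm
          exact hc hcq.symm
      have hstep : pvStepA (segs, buf) c = (segs, buf ++ [c]) := by
        simp [pvStepA, hc]
      rw [hstep, ih _ _ hbc, List.append_assoc]
      rfl

lemma pvSingleton_isIn (a : Char) (l : List Char) :
    PySem.Chars.isIn [a] l = false ↔ a ∉ l := by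
  rw [PySem.Chars.isIn_eq_false_iff]
  constructor
  · intro hinf hm
    obtain ⟨s, t, rfl⟩ := List.append_of_mem hm
    exact hinf ⟨s, t, by simp⟩
  · intro hm hinf
    exact hm (hinf.subset List.mem_cons_self)

-- ===== VERDICT (by name: the statement is the Claim_ definition above) =====
theorem split_after_question_marks_py_spec : Claim_equal_split_after_question_marks_py := by
  intro text _
  unfold Spec_split_after_question_marks_py split_after_question_marks_py split_after_question_marks_py_alt
  by_cases hempty : PySem.Chars.strip text.toList = []
  · simp [hempty]
  · simp only [if_neg hempty]
    have hstrip : PySem.Chars.strip (PySem.Chars.strip text.toList) = PySem.Chars.strip text.toList :=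
      pvStrip_idem _
    have hparts_ne : (PySem.Chars.strip text.toList).splitOn '?' ≠ [] := by
      simpa [List.splitOn] using List.splitOnP_ne_nil (· == '?') (PySem.Chars.strip text.toList)
    by_cases hin : '?' ∈ PySem.Chars.strip text.toList
    · rw [if_neg (fun hf => ((pvSingleton_isIn '?' _).mp hf) hin)]
      trans (pvRender (List.splitOnP (· == '?') (PySem.Chars.strip text.toList)))
      · have h1 := pvLoop (PySem.Chars.strip text.toList) [] [] (by simp)
        rw [List.nil_append] at h1
        exact h1
      · exact (pvB_eq_render ((PySem.Chars.strip text.toList).splitOn '?') hparts_ne).symm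
    · rw [if_pos ((pvSingleton_isIn '?' _).mpr hin)]
      have hsingle : List.splitOnP (· == '?') (PySem.Chars.strip text.toList) = [PySem.Chars.strip text.toList] :=
        List.splitOnP_eq_single _ _ (fun x hx => by
          simp only [beq_iff_eq]; intro hq; exact hin (hq ▸ hx))
      trans (pvRender (List.splitOnP (· == '?') (PySem.Chars.strip text.toList)))
      · rw [hsingle]
        show _ = pvSeg (PySem.Chars.strip text.toList)
        unfold pvSeg
        rw [hstrip, if_pos hempty]
      · exact (pvB_eq_render ((PySem.Chars.strip text.toList).splitOn '?') hparts_ne).symm
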